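-- pv_equiv track=rewrite | github.com/alienspirit7/L26_HomeWork | src/analyzers/book.py | _parse_book_details
-- ===== SOURCE A (Python) =====
-- from typing import List, Tuple
--
-- def _parse_book_details(text: str) -> Tuple[str, str]:
--     """Parse title and author from OCR text."""
--     lines = [l.strip() for l in text.split('\n') if l.strip()]
--     title, author = "", ""
--     if lines:
--         title = lines[0]
--         for line in lines[1:]:
--             if any(kw in line.lower() for kw in ['by ', 'author']):
--                 author = line.replace('by ', '').replace('By ', '').strip()
--                 break
--             if len(line) > 3 and not author:
--                 author = line
--     return title, author
-- ===== SOURCE B (Python) =====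
-- def _parse_book_details(text):
--     """Parse title and author from OCR text (two prioritized scans)."""
--     lines = [l.strip() for l in text.split('\n') if l.strip()]
--     title = lines[0] if lines else ""
--     rest = lines[1:]
--     kw_line = next((l for l in rest if 'by ' in l.lower() or 'author' in l.lower()), None)
--     if kw_line is not None:
--         author = kw_line.replace('by ', '').replace('By ', '').strip()
--     else:
--         author = next((l for l in rest if len(l) > 3), "")
--     return title, author
-- ===== Notes on version B (the rewrite author's own statement) =====
-- stated objective: simpler
-- what changed: Replaces A's single interleaved loop with mutable fallback state, keyword override and break by two separate prioritized scans: a first search for a keyword line ('by '/'author'), and only if none exists a second search for the first line longer than 3 characters.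
import Mathlib
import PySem

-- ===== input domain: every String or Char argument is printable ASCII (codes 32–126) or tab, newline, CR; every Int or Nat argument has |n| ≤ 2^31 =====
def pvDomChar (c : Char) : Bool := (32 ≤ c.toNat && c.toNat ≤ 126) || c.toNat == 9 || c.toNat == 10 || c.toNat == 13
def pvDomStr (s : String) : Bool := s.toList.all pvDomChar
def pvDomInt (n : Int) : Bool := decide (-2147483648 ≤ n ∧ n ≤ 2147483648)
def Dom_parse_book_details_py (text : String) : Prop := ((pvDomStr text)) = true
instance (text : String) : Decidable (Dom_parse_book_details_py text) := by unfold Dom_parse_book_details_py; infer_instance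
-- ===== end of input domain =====

-- B replaces A's single interleaved loop (fallback variable + keyword override + break)
-- by two separate prioritized scans; objective: simpler.


-- ===== PORT A =====
-- 'any(kw in line.lower() for kw in ['by ', 'author'])'
def pvKw (l : String) : Bool :=
  PySem.Str.isIn "by " (PySem.Str.lower l) || PySem.Str.isIn "author" (PySem.Str.lower l)

-- "line.replace('by ', '').replace('By ', '').strip()"
def pvClean (l : String) : String :=
  PySem.Str.strip (PySem.Str.replace (PySem.Str.replace l "by " "") "By " "")

-- "[l.strip() for l in text.split('\n') if l.strip()]"
def pvLines (text : String) : List String :=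
  (((PySem.Str.split? text "\n").getD []).map PySem.Str.strip).filter (fun l => l ≠ "")

-- A's for-loop over lines[1:] with the mutable 'author' and the break
def pvLoopA : List String → String → String
  | [], author => author
  | l :: rest, author =>
    if pvKw l then pvClean l
    else if 3 < PySem.Str.len l ∧ author = "" then pvLoopA rest l
    else pvLoopA rest author

def parse_book_details_py (text : String) : String × String :=
  match pvLines text with
  | [] => ("", "")
  | t :: rest => (t, pvLoopA rest "")

-- ===== PORT B =====
def parse_book_details_py_alt (text : String) : String × String :=
  let lines := pvLines text
  let title := match lines.head? with | some t => t | none => ""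
  let rest := lines.drop 1
  let author :=
    match rest.find? pvKw with
    | some l => pvClean l
    | none => (rest.find? (fun l => decide (3 < PySem.Str.len l))).getD ""
  (title, author)

-- ===== PRECONDITION & SPEC =====
def Spec_parse_book_details_py (text : String) (out : String × String) : Prop := out = parse_book_details_py_alt text
instance (text : String) (out : String × String) : Decidable (Spec_parse_book_details_py text out) := by unfold Spec_parse_book_details_py; infer_instance

-- ===== CLAIM (what is proved, stated in full; the proofs are below) =====
def Claim_equal_parse_book_details_py : Prop := ∀ (text : String), Dom_parse_book_details_py text → Spec_parse_book_details_py text (parse_book_details_py text)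

-- ===== LEMMAS AND PROOFS =====

lemma pvLen_ne_empty {l : String} (h : 3 < PySem.Str.len l) : l ≠ "" := by
  intro he; subst he; simp [PySem.Str.len] at h

-- once the fallback author is a nonempty string, only a keyword line can change it
lemma pvLoopA_ne (rest : List String) (a : String) (ha : a ≠ "") :
    pvLoopA rest a = match rest.find? pvKw with | some l => pvClean l | none => a := by
  induction rest with
  | nil => simp [pvLoopA]
  | cons l rest ih =>
    by_cases hk : pvKw l = true
    · simp [pvLoopA, hk, List.find?]
    · simp [pvLoopA, hk, ha, List.find?, ih]

lemma pvLoopA_empty (rest : List String) :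
    pvLoopA rest "" = match rest.find? pvKw with
      | some l => pvClean l
      | none => (rest.find? (fun l => decide (3 < PySem.Str.len l))).getD "" := by
  induction rest with
  | nil => simp [pvLoopA]
  | cons l rest ih =>
    by_cases hk : pvKw l = true
    · simp [pvLoopA, hk, List.find?]
    · by_cases hl : 3 < PySem.Str.len l
      · have hne := pvLen_ne_empty hl
        have hl' : 3 < l.length := by simpa [PySem.Str.len_eq] using hl
        simp [pvLoopA, hk, List.find?, pvLoopA_ne rest l hne, hl']
      · have hl' : ¬ 3 < l.length := by simpa [PySem.Str.len_eq] using hl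
        simp [pvLoopA, hk, List.find?, ih, hl']

-- ===== VERDICT (by name: the statement is the Claim_ definition above) =====
theorem parse_book_details_py_spec : Claim_equal_parse_book_details_py := by
  intro text _
  unfold Spec_parse_book_details_py parse_book_details_py parse_book_details_py_alt
  cases h : pvLines text with
  | nil => simp
  | cons t rest => simp [pvLoopA_empty rest]
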